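-- pv_equiv track=rewrite | github.com/codingpanda4396/industrial_Python_Learning | Basic/speciality/slice.py | trim
-- ===== SOURCE A (Python) =====
-- def trim(s):
--     # 去除字符串前面的空格
--     start = 0
--     while start < len(s) and s[start] == ' ':
--         start += 1
--
--     # 去除字符串后面的空格
--     end = len(s)
--     while end > start and s[end-1] == ' ':
--         end -= 1
--
--     # 使用切片返回结果
--     return s[start:end]
-- ===== SOURCE B (Python) =====
-- def trim(s):
--     # Single left-to-right pass: record first and last non-space index, slice once.
--     first = None
--     last = -1
--     for i in range(len(s)):
--         if s[i] != ' ':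
--             if first is None:
--                 first = i
--             last = i
--     if first is None:
--         return s[0:0]
--     return s[first:last+1]
-- ===== Notes on version B (the rewrite author's own statement) =====
-- stated objective: alternative
-- what changed: Replaces A's two index-decrementing/incrementing while-loop scans from each end by a single left-to-right pass that records the first and last non-space index and slices once.
import Mathlib
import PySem

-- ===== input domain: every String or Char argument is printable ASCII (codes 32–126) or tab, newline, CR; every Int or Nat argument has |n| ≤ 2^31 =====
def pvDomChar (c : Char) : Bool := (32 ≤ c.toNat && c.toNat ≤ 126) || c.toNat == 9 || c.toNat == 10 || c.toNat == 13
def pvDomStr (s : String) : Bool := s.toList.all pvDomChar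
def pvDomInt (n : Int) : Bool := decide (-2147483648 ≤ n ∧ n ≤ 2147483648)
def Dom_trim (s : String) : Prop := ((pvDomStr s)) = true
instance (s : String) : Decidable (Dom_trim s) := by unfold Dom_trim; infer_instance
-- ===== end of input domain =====

-- B replaces A's two scans from either end by a single left-to-right pass that records the
-- first and last non-space index and slices once; objective: alternative (same cost as A).

-- ===== PORT A =====
-- while start < len(s) and s[start] == ' ': start += 1   (the scan over successive indices
-- becomes the obvious structural recursion over the scanned suffix; result = final `start`)
def trimStartA : List Char → Nat
  | [] => 0
  | c :: t => if c == ' ' then trimStartA t + 1 else 0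

-- while end > start and s[end-1] == ' ': end -= 1   (recursion on the decreasing index `end`;
-- the getD default is never consulted: `end ≤ len(s)` is maintained, so index end-1 is in range)
def trimEndA (cs : List Char) (start : Nat) : Nat → Nat
  | 0 => 0
  | e + 1 => if start < e + 1 && cs.getD e 'x' == ' ' then trimEndA cs start e else e + 1

-- return s[start:end]
def trim (s : String) : String :=
  let cs := s.toList
  let start := trimStartA cs
  let e := trimEndA cs start cs.length
  String.ofList (PySem.List.slice cs (some (start : Int)) (some (e : Int)))

-- ===== PORT B =====
-- loop body: if s[i] != ' ': (first = i if first is None); last = i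
-- (state = (first : Option Int, last : Int), exactly B's two variables)
def stepB (st : Option Int × Int) (ic : Int × Char) : Option Int × Int :=
  if ic.2 == ' ' then st
  else match st.1 with
    | none => (some ic.1, ic.1)
    | some f => (some f, ic.1)

-- one pass over range(len(s)) reading s[i]  (= fold over enumerate), then a single slice
def trim_alt (s : String) : String :=
  let cs := s.toList
  let r := (PySem.List.enumerate cs 0).foldl stepB (none, -1)
  match r.1 with
  | none => String.ofList (PySem.List.slice cs (some 0) (some 0))      -- return s[0:0]
  | some f => String.ofList (PySem.List.slice cs (some f) (some (r.2 + 1)))  -- return s[first:last+1]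

-- ===== PRECONDITION & SPEC =====
def Spec_trim (s : String) (out : String) : Prop := out = trim_alt s
instance (s : String) (out : String) : Decidable (Spec_trim s out) := by unfold Spec_trim; infer_instance

-- ===== CLAIM (what is proved, stated in full; the proofs are below) =====
def Claim_equal_trim : Prop := ∀ (s : String), Dom_trim s → Spec_trim s (trim s)

-- ===== LEMMAS AND PROOFS =====

def lead (cs : List Char) : Nat := (cs.takeWhile (· == ' ')).length
def trail (cs : List Char) : Nat := lead cs.reverse

theorem lead_le (cs : List Char) : lead cs ≤ cs.length := (cs.takeWhile_sublist _).length_le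

theorem getD_of_lt_lead (cs : List Char) (i : Nat) (h : i < lead cs) :
    cs.getD i 'x' = ' ' := by
  induction cs generalizing i with
  | nil => simp [lead] at h
  | cons c t ih =>
    by_cases hc : c = ' '
    · cases i with
      | zero => simp [hc]
      | succ j =>
        simp only [List.getD_cons_succ]
        exact ih j (by simpa [lead, List.takeWhile_cons, hc] using h)
    · simp [lead, hc] at h

theorem getD_lead_ne (cs : List Char) (h : lead cs < cs.length) :
    cs.getD (lead cs) 'x' ≠ ' ' := by
  induction cs with
  | nil => simp at h
  | cons c t ih =>
    by_cases hc : c = ' '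
    · have hl : lead (c :: t) = lead t + 1 := by simp [lead, List.takeWhile_cons, hc]
      rw [hl, List.getD_cons_succ]
      exact ih (by rw [hl] at h; simpa using h)
    · have hl : lead (c :: t) = 0 := by simp [lead, List.takeWhile_cons, hc]
      rw [hl, List.getD_cons_zero]
      exact hc

theorem all_iff_lead (cs : List Char) : cs.all (· == ' ') = true ↔ lead cs = cs.length := by
  induction cs with
  | nil => simp [lead]
  | cons c t ih =>
    by_cases hc : c = ' '
    · have hl : lead (c :: t) = lead t + 1 := by simp [lead, List.takeWhile_cons, hc]
      have hle := lead_le t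
      rw [hl, List.all_cons]
      simp only [hc, beq_self_eq_true, Bool.true_and, List.length_cons]
      rw [ih]
      omega
    · have hl : lead (c :: t) = 0 := by simp [lead, List.takeWhile_cons, hc]
      rw [hl]
      simp [List.all_cons, hc]

theorem trail_lt (cs : List Char) (h : ¬ cs.all (· == ' ') = true) : trail cs < cs.length := by
  have h1 : ¬ cs.reverse.all (· == ' ') = true := by simpa using h
  have h2 := (all_iff_lead cs.reverse).not.mp h1
  have h3 := lead_le cs.reverse
  unfold trail
  simp only [List.length_reverse] at h2 h3
  omega

theorem getD_rev (cs : List Char) (i : Nat) (h : i < cs.length) :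
    cs.getD i 'x' = cs.reverse.getD (cs.length - 1 - i) 'x' := by
  rw [List.getD_eq_getElem?_getD, List.getD_eq_getElem?_getD,
    List.getElem?_reverse (by omega)]
  congr 2
  omega

theorem getD_trail (cs : List Char) (i : Nat) (h1 : cs.length - trail cs ≤ i) (h2 : i < cs.length) :
    cs.getD i 'x' = ' ' := by
  rw [getD_rev cs i h2]
  apply getD_of_lt_lead
  unfold trail at h1
  have := lead_le cs.reverse
  simp only [List.length_reverse] at this
  omega

theorem getD_last_ne (cs : List Char) (h : ¬ cs.all (· == ' ') = true) :
    cs.getD (cs.length - trail cs - 1) 'x' ≠ ' ' := by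
  have hne := trail_lt cs h
  rw [getD_rev cs _ (by omega)]
  have hidx : cs.length - 1 - (cs.length - trail cs - 1) = trail cs := by omega
  rw [hidx]
  apply getD_lead_ne
  have h1 : ¬ cs.reverse.all (· == ' ') = true := by simpa using h
  have h2 := (all_iff_lead cs.reverse).not.mp h1
  have h3 := lead_le cs.reverse
  simp only [List.length_reverse] at h2 h3 ⊢
  omega

theorem lead_le_last (cs : List Char) (h : ¬ cs.all (· == ' ') = true) :
    lead cs ≤ cs.length - trail cs - 1 := by
  have hne := trail_lt cs h
  by_contra hlt
  push_neg at hlt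
  exact getD_last_ne cs h (getD_of_lt_lead cs _ (by omega))

theorem trimStartA_eq (cs : List Char) : trimStartA cs = lead cs := by
  induction cs with
  | nil => rfl
  | cons c t ih =>
    by_cases h : c = ' ' <;> simp [trimStartA, lead, List.takeWhile_cons, h, ih] <;> simp [lead] at ih <;> omega

theorem trimEndA_eq (cs : List Char) (h : ¬ cs.all (· == ' ') = true) (e : Nat)
    (h1 : cs.length - trail cs ≤ e) (h2 : e ≤ cs.length) :
    trimEndA cs (lead cs) e = cs.length - trail cs := by
  induction e with
  | zero =>
    have := trail_lt cs h
    omega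
  | succ k ih =>
    have hlast := lead_le_last cs h
    have hne := trail_lt cs h
    by_cases hk : cs.length - trail cs ≤ k
    · have hsp : cs.getD k 'x' = ' ' := getD_trail cs k hk (by omega)
      have hlt : lead cs < k + 1 := by omega
      rw [trimEndA, if_pos (by rw [Bool.and_eq_true, decide_eq_true_iff, beq_iff_eq]; exact ⟨hlt, hsp⟩)]
      exact ih (by omega) (by omega)
    · have hk1 : k + 1 = cs.length - trail cs := by omega
      have hns : cs.getD k 'x' ≠ ' ' := by
        have hidx : cs.length - trail cs - 1 = k := by omega
        rw [← hidx]
        exact getD_last_ne cs h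
      rw [trimEndA, if_neg (by rw [Bool.and_eq_true, decide_eq_true_iff, beq_iff_eq]; exact fun hx => hns hx.2)]
      omega

theorem trimEndA_all (cs : List Char) (h : cs.all (· == ' ') = true) :
    trimEndA cs (lead cs) cs.length = cs.length := by
  have hl : lead cs = cs.length := (all_iff_lead cs).mp h
  rw [hl]
  cases hn : cs.length with
  | zero => rfl
  | succ k => rw [trimEndA, if_neg (by simp)]

theorem lead_append_not_all (t : List Char) (c : Char) (ha : ¬ t.all (· == ' ') = true) :
    lead (t ++ [c]) = lead t := by
  unfold lead
  rw [List.takeWhile_append, if_neg]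
  intro hlen
  exact ha ((all_iff_lead t).mpr hlen)

theorem lead_append_all_ns (t : List Char) (c : Char) (ha : t.all (· == ' ') = true)
    (hc : ¬ c = ' ') : lead (t ++ [c]) = t.length := by
  have h := (all_iff_lead t).mp ha
  unfold lead at h ⊢
  rw [List.takeWhile_append, if_pos h]
  simp [List.takeWhile_cons, hc]

theorem trail_append_sp (t : List Char) : trail (t ++ [' ']) = trail t + 1 := by
  unfold trail lead
  simp [List.takeWhile_cons]

theorem trail_append_ns (t : List Char) (c : Char) (hc : ¬ c = ' ') : trail (t ++ [c]) = 0 := by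
  unfold trail lead
  simp [List.takeWhile_cons, hc]

theorem foldB_char (cs : List Char) :
    (PySem.List.enumerate cs 0).foldl stepB (none, -1) =
      (if cs.all (· == ' ') then ((none : Option Int), (-1 : Int))
       else (some (lead cs : Nat), ((cs.length - trail cs - 1 : Nat) : Int))) := by
  induction cs using List.reverseRecOn with
  | nil => simp [PySem.List.enumerate]
  | append_singleton t c ih =>
    rw [PySem.List.enumerate_append, List.foldl_append, ih]
    have henum : PySem.List.enumerate [c] (0 + (t.length : Int)) = [((t.length : Int), c)] := by
      simp [PySem.List.enumerate]
    rw [henum]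
    by_cases hc : c = ' '
    · subst hc
      have hall : ((t ++ [' ']).all (· == ' ')) = t.all (· == ' ') := by simp
      by_cases ha : t.all (· == ' ') = true
      · rw [if_pos ha, if_pos (by rw [hall]; exact ha)]
        simp [stepB]
      · rw [if_neg ha, if_neg (by rw [hall]; exact ha)]
        have hlt := trail_lt t ha
        rw [lead_append_not_all t ' ' ha, trail_append_sp t]
        simp only [List.foldl_cons, List.foldl_nil, stepB]
        rw [if_pos (show (' ' == ' ') = true from rfl)]
        refine Prod.ext rfl ?_
        simp only [List.length_append, List.length_cons, List.length_nil]
        congr 1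
        omega
    · have hnall : ¬ ((t ++ [c]).all (· == ' ')) = true := by
        simp only [List.all_append, List.all_cons, List.all_nil, Bool.and_eq_true]
        rintro ⟨-, h2, -⟩
        exact hc (by simpa using h2)
      rw [if_neg hnall]
      have htr := trail_append_ns t c hc
      have hcb : ¬ (c == ' ') = true := by simp [hc]
      by_cases ha : t.all (· == ' ') = true
      · rw [if_pos ha]
        simp only [List.foldl_cons, List.foldl_nil, stepB, if_neg hcb]
        rw [lead_append_all_ns t c ha hc, htr]
        refine Prod.ext rfl ?_
        simp
      · rw [if_neg ha]
        simp only [List.foldl_cons, List.foldl_nil, stepB, if_neg hcb]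
        rw [lead_append_not_all t c ha, htr]
        refine Prod.ext rfl ?_
        simp

theorem trim_eq_alt (s : String) : trim s = trim_alt s := by
  show String.ofList (PySem.List.slice s.toList (some (trimStartA s.toList : Int))
      (some (trimEndA s.toList (trimStartA s.toList) s.toList.length : Int)))
    = match ((PySem.List.enumerate s.toList 0).foldl stepB (none, -1)).1 with
      | none => String.ofList (PySem.List.slice s.toList (some 0) (some 0))
      | some f => String.ofList (PySem.List.slice s.toList (some f)
          (some (((PySem.List.enumerate s.toList 0).foldl stepB (none, -1)).2 + 1)))
  rw [foldB_char, trimStartA_eq]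
  by_cases ha : s.toList.all (· == ' ') = true
  · rw [if_pos ha, trimEndA_all _ ha]
    have hl : lead s.toList = s.toList.length := (all_iff_lead _).mp ha
    rw [hl]
    simp [PySem.List.slice_natCast, PySem.List.slice]
  · rw [if_neg ha, trimEndA_eq _ ha s.toList.length (by omega) (le_refl _)]
    have hne := trail_lt _ ha
    have h1 : ((s.toList.length - trail s.toList - 1 : Nat) : Int) + 1
        = ((s.toList.length - trail s.toList : Nat) : Int) := by omega
    rw [show (match (some ((lead s.toList : Nat) : Int), ((s.toList.length - trail s.toList - 1 : Nat) : Int)).1 with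
      | none => String.ofList (PySem.List.slice s.toList (some 0) (some 0))
      | some f => String.ofList (PySem.List.slice s.toList (some f)
          (some ((some ((lead s.toList : Nat) : Int), ((s.toList.length - trail s.toList - 1 : Nat) : Int)).2 + 1)))
      : String)
      = String.ofList (PySem.List.slice s.toList (some ((lead s.toList : Nat) : Int))
          (some (((s.toList.length - trail s.toList - 1 : Nat) : Int) + 1))) from rfl, h1]

-- ===== VERDICT (by name: the statement is the Claim_ definition above) =====
theorem trim_spec : Claim_equal_trim := by
  intro s _
  unfold Spec_trim
  exact trim_eq_alt s
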